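-- pv_equiv track=rewrite | github.com/pacuuuuu3/Analisis-Numerico | Practica1/5.py | siguiente
-- ===== SOURCE A (Python) =====
-- def siguiente(i):
--     cadena = str(i)
--     longitud = len(cadena)
--     if(cadena == '9'*longitud):
--         return int('1'*(longitud+1))
--     else:
--         contador = -1
--         while(cadena[contador] == '9'):
--             new = list(cadena)
--             new[contador] = '1'
--             cadena = ''.join(new)
--             contador -= 1
--         new = list(cadena)
--         new[contador] = chr(ord(new[contador]) + 1)
--         nueva_cadena = ''.join(new)
--         return int(nueva_cadena)
-- ===== SOURCE B (Python) =====
-- def siguiente(i):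
--     s = str(i)
--     stripped = s.rstrip('9')
--     if stripped == '':
--         return int('1' * (len(s) + 1))
--     k = len(s) - len(stripped)
--     return int(stripped[:-1] + chr(ord(stripped[-1]) + 1) + '1' * k)
-- ===== Notes on version B (the rewrite author's own statement) =====
-- stated objective: simpler
-- what changed: Replaces A's char-by-char while loop (which rebuilds the whole string once per trailing nine) with a single direct construction: strip the trailing nines, increment the last remaining character, append that many ones.
import Mathlib
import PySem

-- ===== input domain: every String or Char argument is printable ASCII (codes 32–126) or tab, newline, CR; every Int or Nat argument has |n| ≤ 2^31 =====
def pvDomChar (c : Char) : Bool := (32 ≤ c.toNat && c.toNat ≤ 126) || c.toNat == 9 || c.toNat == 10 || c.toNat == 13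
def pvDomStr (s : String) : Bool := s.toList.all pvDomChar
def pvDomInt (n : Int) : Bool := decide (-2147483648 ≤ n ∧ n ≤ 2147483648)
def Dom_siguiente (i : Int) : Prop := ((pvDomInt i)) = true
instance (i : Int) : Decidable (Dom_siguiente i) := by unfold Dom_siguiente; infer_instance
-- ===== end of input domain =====

-- B replaces A's while loop (which rebuilds the whole string once per trailing nine) with one
-- direct string construction: strip the trailing nines, bump the last remaining character,
-- append that many ones; objective: simpler.

-- ===== PORT A =====
-- A's while loop: state (cadena, contador); each iteration writes '1' at index contador
-- (Python new = list(cadena); new[contador] = '1'; cadena = ''.join(new)) and decrements contador.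
def siguienteLoop (cadena : List Char) (contador : Int) : List Char × Int :=
  if h : PySem.List.pyGet? cadena contador = some '9' then
    siguienteLoop (PySem.List.pySetD cadena contador '1') (contador - 1)
  else (cadena, contador)
termination_by (cadena.length + contador + 1).toNat
decreasing_by
  have hin : PySem.Raise.InRange cadena.length contador := by
    by_contra hc
    rw [← PySem.List.pyGet?_eq_none_iff] at hc
    simp [hc] at h
  have h1 : -(cadena.length : Int) ≤ contador := hin.1
  rw [PySem.List.length_pySetD]
  omega

-- chr(ord(c) + 1) is ported as Char.ofNat (c.toNat + 1), exact for the code points reached here.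
def siguiente (i : Int) : Int :=
  let cadena := PySem.Int.toChars i
  let longitud := cadena.length
  if cadena = List.replicate longitud '9' then
    (PySem.Int.ofChars? (List.replicate (longitud + 1) '1')).getD 0
  else
    let r := siguienteLoop cadena (-1)
    let c := PySem.List.pyGetD r.1 r.2 ' '
    (PySem.Int.ofChars? (PySem.List.pySetD r.1 r.2 (Char.ofNat (c.toNat + 1)))).getD 0

-- ===== PORT B =====
def siguiente_alt (i : Int) : Int :=
  let s := PySem.Int.toChars i
  -- s.rstrip('9'), ported by hand: drop the trailing run of '9' via the reversed list (exact)
  let stripped := (s.reverse.dropWhile (fun c => c = '9')).reverse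
  if stripped = [] then
    (PySem.Int.ofChars? (List.replicate (s.length + 1) '1')).getD 0
  else
    let k := s.length - stripped.length
    let c := PySem.List.pyGetD stripped (-1) ' '
    (PySem.Int.ofChars? (PySem.List.slice stripped none (some (-1)) ++
        Char.ofNat (c.toNat + 1) :: List.replicate k '1')).getD 0

-- ===== PRECONDITION & SPEC =====
-- Pre_ excludes the negative all-nines integers (-9, -99, …): there Python A (and B alike)
-- feeds '-' through chr(ord+1), producing '.', and int('.1…1') raises ValueError.
def Pre_siguiente (i : Int) : Prop :=
  0 ≤ i ∨ ¬ (((PySem.Int.toChars i).drop 1).all (fun c => c = '9') = true)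
instance (i : Int) : Decidable (Pre_siguiente i) := by unfold Pre_siguiente; infer_instance
def pvWitness_siguiente : Int := 5

def Spec_siguiente (i : Int) (out : Int) : Prop := out = siguiente_alt i
instance (i : Int) (out : Int) : Decidable (Spec_siguiente i out) := by unfold Spec_siguiente; infer_instance

-- ===== CLAIM (what is proved, stated in full; the proofs are below) =====
def Claim_equal_siguiente : Prop := ∀ (i : Int), Dom_siguiente i → Pre_siguiente i → Spec_siguiente i (siguiente i)

-- ===== LEMMAS AND PROOFS =====

lemma pySetD_neg (xs : List Char) (k : Nat) (v : Char) (h0 : 0 < k) (h1 : k ≤ xs.length) :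
    PySem.List.pySetD xs (-(k : Int)) v = xs.set (xs.length - k) v := by
  unfold PySem.List.pySetD PySem.List.pySet? PySem.List.pyIdx?
  rw [if_neg (by omega), if_pos (by omega)]
  simp

lemma set_last_append {α : Type} (pre : List α) (hne : pre ≠ []) (tail : List α) (v : α) :
    (pre ++ tail).set (pre.length - 1) v = pre.dropLast ++ v :: tail := by
  conv_lhs => rw [show pre = pre.dropLast ++ [pre.getLast hne] from
    (List.dropLast_append_getLast hne).symm]
  rw [List.append_assoc, List.set_append, if_neg (by simp)]
  simp

lemma loop_spec (pre : List Char) (hne : pre ≠ []) (h9 : pre.getLast hne ≠ '9') (k : Nat) :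
    ∀ (j : Nat),
      siguienteLoop (pre ++ List.replicate k '9' ++ List.replicate j '1') (-((j : Int) + 1)) =
        (pre ++ List.replicate (k + j) '1', -((k : Int) + (j : Int) + 1)) := by
  induction k with
  | zero =>
    intro j
    have hp : 0 < pre.length := List.length_pos_of_ne_nil hne
    rw [siguienteLoop]
    have hcast : -((j : Int) + 1) = -((j + 1 : Nat) : Int) := by push_cast; ring
    have hget : PySem.List.pyGet? (pre ++ List.replicate 0 '9' ++ List.replicate j '1')
        (-((j : Int) + 1)) = some (pre.getLast hne) := by
      rw [hcast, PySem.List.pyGet?_neg_natCast _ (j + 1) (by omega) (by simp; omega)]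
      simp
      have hix : pre.length + j - (j + 1) = pre.length - 1 := by omega
      rw [List.getElem?_append_left (by omega), List.getLast_eq_getElem]
      rw [List.getElem?_eq_getElem (by omega)]
      simp [hix]
    rw [dif_neg (by rw [hget]; simp [h9])]
    simp
  | succ k ih =>
    intro j
    have hp : 0 < pre.length := List.length_pos_of_ne_nil hne
    rw [siguienteLoop]
    have hcast : -((j : Int) + 1) = -((j + 1 : Nat) : Int) := by push_cast; ring
    have hL : pre ++ List.replicate (k + 1) '9' ++ List.replicate j '1'
        = (pre ++ List.replicate k '9') ++ ('9' :: List.replicate j '1') := by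
      rw [List.replicate_succ']
      simp
    have hget : PySem.List.pyGet? (pre ++ List.replicate (k + 1) '9' ++ List.replicate j '1')
        (-((j : Int) + 1)) = some '9' := by
      rw [hcast, PySem.List.pyGet?_neg_natCast _ (j + 1) (by omega) (by simp; omega), hL]
      have hlen : (pre ++ List.replicate k '9' ++ ('9' :: List.replicate j '1')).length - (j + 1)
          = (pre ++ List.replicate k '9').length := by simp; omega
      rw [hlen, List.getElem?_append_right (le_refl _)]
      simp
    rw [dif_pos hget]
    have hset : PySem.List.pySetD (pre ++ List.replicate (k + 1) '9' ++ List.replicate j '1')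
        (-((j : Int) + 1)) '1'
        = pre ++ List.replicate k '9' ++ List.replicate (j + 1) '1' := by
      rw [hcast, pySetD_neg _ (j + 1) _ (by omega) (by simp; omega), hL]
      have hidx : ((pre ++ List.replicate k '9') ++ ('9' :: List.replicate j '1')).length - (j + 1)
          = (pre ++ List.replicate k '9').length := by simp; omega
      rw [hidx, List.set_append, if_neg (by omega)]
      simp [List.replicate_succ]
    rw [hset]
    have harg : -((j : Int) + 1) - 1 = -(((j + 1 : Nat) : Int) + 1) := by push_cast; ring
    rw [harg, ih (j + 1)]
    simp only [Prod.mk.injEq]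
    constructor
    · rw [show k + (j + 1) = k + 1 + j from by omega]
    · push_cast
      ring

-- ===== VERDICT (by name: the statement is the Claim_ definition above) =====
theorem siguiente_spec : Claim_equal_siguiente := by
  intro i hdom hpre
  unfold Spec_siguiente
  simp only [siguiente, siguiente_alt]
  set s := PySem.Int.toChars i with hs
  set t := s.reverse.takeWhile (fun c => c = '9') with ht
  set d := s.reverse.dropWhile (fun c => c = '9') with hd
  have htrep : t = List.replicate t.length '9' := by
    rw [List.eq_replicate_iff]
    exact ⟨rfl, fun b hb => by simpa using List.mem_takeWhile_imp hb⟩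
  have hts : t ++ d = s.reverse := List.takeWhile_append_dropWhile
  have hsd : s = d.reverse ++ List.replicate t.length '9' := by
    have h1 : s = d.reverse ++ t.reverse := by
      rw [← List.reverse_reverse s, ← hts, List.reverse_append]
    have h2 : t.reverse = List.replicate t.length '9' := by
      conv_lhs => rw [htrep]
      rw [List.reverse_replicate]
    rw [h1, h2]
  by_cases hcase : d = []
  · have hlen : s.length = t.length := by rw [hsd, hcase]; simp
    have hsrep : s = List.replicate s.length '9' := by
      rw [hlen]
      rw [hsd, hcase]
      simp
    rw [if_pos hsrep, if_pos (by rw [hcase]; simp)]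
  · have hne : d.reverse ≠ [] := by simpa using hcase
    have hdh : d.head? = some (d.head hcase) := List.head?_eq_some_head hcase
    have hnot := List.head?_dropWhile_not (fun c => decide (c = '9')) s.reverse
    rw [← hd, hdh] at hnot
    simp at hnot
    have hlast : d.reverse.getLast hne ≠ '9' := by
      have h1 : d.reverse.getLast? = d.head? := List.getLast?_reverse
      rw [List.getLast?_eq_some_getLast hne, hdh] at h1
      have := Option.some.inj h1
      rw [this]
      exact hnot
    have hA : ¬ s = List.replicate s.length '9' := by
      intro hrep
      apply hcase
      rw [hd]
      rw [List.dropWhile_eq_nil_iff]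
      intro x hx
      have : x ∈ s := by simpa using hx
      rw [hrep] at this
      simpa using List.eq_of_mem_replicate this
    rw [if_neg hA, if_neg hne]
    -- set up the shared decomposition
    have hp : 0 < d.length := List.length_pos_of_ne_nil hcase
    have hp2 : 0 < d.reverse.length := by simpa using hp
    have hr : siguienteLoop s (-1)
        = (d.reverse ++ List.replicate t.length '1', -((t.length : Int) + 1)) := by
      have h0 := loop_spec d.reverse hne hlast t.length 0
      simp only [List.replicate, Nat.cast_zero] at h0
      have harg : -((0 : Int) + 1) = (-1 : Int) := by ring
      rw [harg] at h0
      rw [hsd]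
      simpa using h0
    rw [hr]
    have hlenL : (d.reverse ++ List.replicate t.length '1').length = d.length + t.length := by simp
    have hcastk : -((t.length : Int) + 1) = -((t.length + 1 : Nat) : Int) := by push_cast; ring
    have hc : PySem.List.pyGetD (d.reverse ++ List.replicate t.length '1')
        (-((t.length : Int) + 1)) ' ' = d.reverse.getLast hne := by
      rw [hcastk, PySem.List.pyGetD_neg_natCast _ (t.length + 1) _ (by omega)
        (by simp; omega)]
      have hidx : (d.reverse ++ List.replicate t.length '1').length - (t.length + 1)
          = d.reverse.length - 1 := by simp; omega
      rw [List.getLast_eq_getElem]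
      simp only [hidx]
      rw [List.getElem_append_left (by omega)]
    rw [hc]
    have hset : PySem.List.pySetD (d.reverse ++ List.replicate t.length '1')
        (-((t.length : Int) + 1)) (Char.ofNat ((d.reverse.getLast hne).toNat + 1))
        = d.reverse.dropLast ++ Char.ofNat ((d.reverse.getLast hne).toNat + 1)
            :: List.replicate t.length '1' := by
      rw [hcastk, pySetD_neg _ (t.length + 1) _ (by omega) (by simp; omega)]
      have hidx2 : (d.reverse ++ List.replicate t.length '1').length - (t.length + 1)
          = d.reverse.length - 1 := by simp; omega
      rw [hidx2]
      exact set_last_append d.reverse hne _ _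
    rw [hset]
    -- B side
    have hkB : s.length - d.reverse.length = t.length := by rw [hsd]; simp
    rw [hkB, PySem.List.pyGetD_neg_one _ _ hne, PySem.List.slice_to_neg_one]
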